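-- pv_equiv track=rewrite | github.com/EvoltPratom/AOCode2022 | day3/first.py | common_letter_betn_str
-- ===== SOURCE A (Python) =====
-- ascii_letters = ["",'a', 'b', 'c', 'd', 'e', 'f', 'g', 'h', 'i', 'j', 'k', 'l', 'm', 'n', 'o', 'p', 'q', 'r', 's', 't', 'u', 'v', 'w', 'x', 'y', 'z', 'A', 'B', 'C', 'D', 'E', 'F', 'G', 'H', 'I', 'J', 'K', 'L', 'M', 'N', 'O', 'P', 'Q', 'R', 'S', 'T', 'U', 'V', 'W', 'X', 'Y', 'Z']
--
-- priority = ascii_letters.index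
--
-- def common_letter_betn_str(str1,str2):
--     cur_priority = 0
--     for i in ascii_letters:
--         if i in str1 and i in str2:
--             t_p = priority(i)
--             if t_p > cur_priority:
--                 cur_priority = t_p
--
--     return cur_priority#, ascii_letters[cur_priority]
-- ===== SOURCE B (Python) =====
-- def common_letter_betn_str(str1, str2):
--     common = set(str1) & set(str2)
--     return max((ord(c) - 96 if c.islower() else ord(c) - 38
--                 for c in common if c.isalpha()), default=0)
-- ===== Notes on version B (the rewrite author's own statement) =====
-- stated objective: simpler
-- what changed: Instead of scanning a fixed 53-entry alphabet list with two substring tests and a list.index per hit, B intersects the two character sets once and takes the max of an ord()-based priority formula over the common letters.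
import Mathlib
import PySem

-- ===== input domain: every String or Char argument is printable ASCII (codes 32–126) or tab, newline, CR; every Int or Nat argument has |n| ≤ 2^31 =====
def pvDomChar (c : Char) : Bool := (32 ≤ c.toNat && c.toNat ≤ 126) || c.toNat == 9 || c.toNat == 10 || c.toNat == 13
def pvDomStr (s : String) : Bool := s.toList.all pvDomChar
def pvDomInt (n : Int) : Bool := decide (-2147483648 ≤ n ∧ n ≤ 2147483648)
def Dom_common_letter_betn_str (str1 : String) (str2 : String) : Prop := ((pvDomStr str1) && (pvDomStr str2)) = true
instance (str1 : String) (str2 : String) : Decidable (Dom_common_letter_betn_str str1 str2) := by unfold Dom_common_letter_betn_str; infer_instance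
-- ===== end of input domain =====

-- B replaces A's scan of a fixed 53-entry alphabet list (two substring tests and a
-- list.index per entry) by one pass over the intersection of the two character sets,
-- computing each priority with an ord()-based formula; objective: simpler.

-- ===== PORT A =====
def pvAsciiLetters : List String :=
  ["", "a", "b", "c", "d", "e", "f", "g", "h", "i", "j", "k", "l", "m",
   "n", "o", "p", "q", "r", "s", "t", "u", "v", "w", "x", "y", "z",
   "A", "B", "C", "D", "E", "F", "G", "H", "I", "J", "K", "L", "M",
   "N", "O", "P", "Q", "R", "S", "T", "U", "V", "W", "X", "Y", "Z"]

-- priority(i) = ascii_letters.index(i); inside the loop i is always a member,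
-- so the ValueError branch of list.index is unreachable and `.getD 0` is exact.
def common_letter_betn_str (str1 : String) (str2 : String) : Int :=
  pvAsciiLetters.foldl (fun cur_priority i =>
    if PySem.Str.isIn i str1 && PySem.Str.isIn i str2 then
      let t_p : Int := ((PySem.List.index? pvAsciiLetters i).getD 0 : Nat)
      if t_p > cur_priority then t_p else cur_priority
    else cur_priority) 0

-- ===== PORT B =====
def pvPrio (c : Char) : Int :=
  if PySem.Chars.islower c then (c.toNat : Int) - 96 else (c.toNat : Int) - 38

-- max(gen, default=0) over the common alphabetic characters, as foldl max 0
def common_letter_betn_str_alt (str1 : String) (str2 : String) : Int :=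
  let common : PySem.Set Char :=
    PySem.Set.inter (PySem.Set.ofList str1.toList) (PySem.Set.ofList str2.toList)
  ((common.filter (fun c => PySem.Chars.isalpha c)).map pvPrio).foldl max 0

-- ===== PRECONDITION & SPEC =====
def Spec_common_letter_betn_str (str1 : String) (str2 : String) (out : Int) : Prop := out = common_letter_betn_str_alt str1 str2
instance (str1 : String) (str2 : String) (out : Int) : Decidable (Spec_common_letter_betn_str str1 str2 out) := by unfold Spec_common_letter_betn_str; infer_instance

-- ===== CLAIM (what is proved, stated in full; the proofs are below) =====
def Claim_equal_common_letter_betn_str : Prop := ∀ (str1 : String) (str2 : String), Dom_common_letter_betn_str str1 str2 → Spec_common_letter_betn_str str1 str2 (common_letter_betn_str str1 str2)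

-- ===== LEMMAS AND PROOFS =====

def pvLetterChars : List Char :=
  ['a','b','c','d','e','f','g','h','i','j','k','l','m',
   'n','o','p','q','r','s','t','u','v','w','x','y','z',
   'A','B','C','D','E','F','G','H','I','J','K','L','M',
   'N','O','P','Q','R','S','T','U','V','W','X','Y','Z']

theorem pvAscii_eq : pvAsciiLetters = "" :: pvLetterChars.map (fun c => String.ofList [c]) := by
  simp only [pvAsciiLetters, pvLetterChars, List.map]

theorem pvLetter_facts : ∀ c ∈ pvLetterChars,
    PySem.Chars.isalpha c = true ∧
    (PySem.List.index? pvLetterChars c).map (fun k => ((k + 1 : Nat) : Int)) = some (pvPrio c) := by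
  intro c hc
  fin_cases hc <;> exact ⟨by decide, by decide⟩

theorem pvOfList_single_ne (d c : Char) (h : d ≠ c) : String.ofList [d] ≠ String.ofList [c] := by
  intro he
  have := congrArg String.toList he
  simp only [String.toList_ofList, List.cons.injEq, and_true] at this
  exact h this

theorem pvIndex_map (l : List Char) (c : Char) :
    PySem.List.index? (l.map (fun d => String.ofList [d])) (String.ofList [c])
      = PySem.List.index? l c := by
  induction l with
  | nil => rfl
  | cons d t ih =>
    rw [List.map_cons]
    by_cases h : d = c
    · subst h
      rw [PySem.List.index?_cons_self, PySem.List.index?_cons_self]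
    · rw [PySem.List.index?_cons_of_ne _ (pvOfList_single_ne d c h),
          PySem.List.index?_cons_of_ne _ h, ih]

theorem pvIdx (c : Char) (hc : c ∈ pvLetterChars) :
    (((PySem.List.index? pvAsciiLetters (String.ofList [c])).getD 0 : Nat) : Int) = pvPrio c := by
  have hmapeq := (pvLetter_facts c hc).2
  have hne : ("" : String) ≠ String.ofList [c] := by
    intro he
    have := congrArg String.toList he
    simp only [String.toList_ofList] at this
    exact List.cons_ne_nil c [] this.symm
  rw [pvAscii_eq, PySem.List.index?_cons_of_ne _ hne, pvIndex_map]
  obtain ⟨k, hk⟩ := Option.isSome_iff_exists.mp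
    ((PySem.List.index?_isSome_iff pvLetterChars c).mpr hc)
  rw [hk] at hmapeq ⊢
  simp only [Option.map_some, Option.some.injEq] at hmapeq
  simpa using hmapeq

theorem pvMem_of_map_toNat (c : Char) (l : List Char) (h : c.toNat ∈ l.map Char.toNat) :
    c ∈ l := by
  simp only [List.mem_map] at h
  obtain ⟨d, hd, hdc⟩ := h
  have : d = c := Char.ext (UInt32.toNat_inj.mp hdc)
  exact this ▸ hd

theorem pvMem_letters_of_isalpha (c : Char) (h : PySem.Chars.isalpha c = true) :
    c ∈ pvLetterChars := by
  have hint : (97 ≤ c.toNat ∧ c.toNat ≤ 122) ∨ (65 ≤ c.toNat ∧ c.toNat ≤ 90) := by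
    simp only [PySem.Chars.isalpha, PySem.Chars.islower, PySem.Chars.isupper,
      Bool.or_eq_true, Bool.and_eq_true, decide_eq_true_eq] at h
    rcases h with ⟨h1, h2⟩ | ⟨h1, h2⟩ <;>
      [right; left] <;>
      exact ⟨Nat.le_of_lt_succ (Nat.lt_succ_of_le (by exact_mod_cast UInt32.le_iff_toNat_le.mp (Char.le_def.mp h1))),
             by exact_mod_cast UInt32.le_iff_toNat_le.mp (Char.le_def.mp h2)⟩
  apply pvMem_of_map_toNat
  have hmap : pvLetterChars.map Char.toNat =
      [97,98,99,100,101,102,103,104,105,106,107,108,109,110,111,112,113,114,115,116,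
       117,118,119,120,121,122,65,66,67,68,69,70,71,72,73,74,75,76,77,78,79,80,81,82,
       83,84,85,86,87,88,89,90] := by decide
  rw [hmap]
  simp only [List.mem_cons, List.not_mem_nil, or_false]
  omega

theorem pvSingleton_infix_iff (c : Char) (l : List Char) : [c] <:+: l ↔ c ∈ l := by
  constructor
  · intro h
    exact h.sublist.subset (List.mem_singleton_self c)
  · intro h
    obtain ⟨s, t, rfl⟩ := List.append_of_mem h
    exact ⟨s, t, by simp⟩

theorem pvIsIn_single (c : Char) (s : String) :
    PySem.Str.isIn (String.ofList [c]) s = true ↔ c ∈ s.toList := by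
  rw [PySem.Str.isIn_iff_infix]
  rw [String.toList_ofList]
  exact pvSingleton_infix_iff c s.toList

theorem pvFoldMax_le_iff (l : List Int) (a b : Int) :
    l.foldl max a ≤ b ↔ a ≤ b ∧ ∀ x ∈ l, x ≤ b := by
  induction l generalizing a with
  | nil => simp
  | cons x t ih =>
    simp only [List.foldl_cons, ih, List.mem_cons, max_le_iff]
    constructor
    · rintro ⟨⟨h1, h2⟩, h3⟩
      exact ⟨h1, fun y hy => hy.elim (fun h => h ▸ h2) (h3 y)⟩
    · rintro ⟨h1, h2⟩
      exact ⟨⟨h1, h2 x (Or.inl rfl)⟩, fun y hy => h2 y (Or.inr hy)⟩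

theorem pvFoldA_le_iff {α : Type} (p : α → Bool) (f : α → Int) (l : List α) (a b : Int) :
    (l.foldl (fun cur i => if p i then (if f i > cur then f i else cur) else cur) a) ≤ b
      ↔ a ≤ b ∧ ∀ i ∈ l, p i = true → f i ≤ b := by
  induction l generalizing a with
  | nil => simp
  | cons x t ih =>
    simp only [List.foldl_cons, ih, List.mem_cons]
    by_cases hp : p x = true
    · simp only [hp, if_true]
      by_cases hf : f x > a
      · simp only [hf, if_pos]
        constructor
        · rintro ⟨h1, h2⟩
          refine ⟨le_trans (le_of_lt hf) h1, fun i hi hpi => ?_⟩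
          rcases hi with rfl | hi
          · exact h1
          · exact h2 i hi hpi
        · rintro ⟨h1, h2⟩
          exact ⟨h2 x (Or.inl rfl) hp, fun i hi hpi => h2 i (Or.inr hi) hpi⟩
      · simp only [hf, if_false]
        constructor
        · rintro ⟨h1, h2⟩
          refine ⟨h1, fun i hi hpi => ?_⟩
          rcases hi with rfl | hi
          · omega
          · exact h2 i hi hpi
        · rintro ⟨h1, h2⟩
          exact ⟨h1, fun i hi hpi => h2 i (Or.inr hi) hpi⟩
    · simp only [hp]
      constructor
      · rintro ⟨h1, h2⟩
        refine ⟨h1, fun i hi hpi => ?_⟩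
        rcases hi with rfl | hi
        · exact absurd hpi hp
        · exact h2 i hi hpi
      · rintro ⟨h1, h2⟩
        exact ⟨h1, fun i hi hpi => h2 i (Or.inr hi) hpi⟩

theorem pvMain (str1 str2 : String) :
    common_letter_betn_str str1 str2 = common_letter_betn_str_alt str1 str2 := by
  set p : String → Bool := fun i => PySem.Str.isIn i str1 && PySem.Str.isIn i str2 with hp
  set f : String → Int := fun i => ((PySem.List.index? pvAsciiLetters i).getD 0 : Nat) with hf
  set common : PySem.Set Char :=
    PySem.Set.inter (PySem.Set.ofList str1.toList) (PySem.Set.ofList str2.toList) with hc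
  set lB : List Int := (common.filter (fun c => PySem.Chars.isalpha c)).map pvPrio with hlB
  have hA : common_letter_betn_str str1 str2 =
      pvAsciiLetters.foldl (fun cur i => if p i then (if f i > cur then f i else cur) else cur) 0 := rfl
  have hB : common_letter_betn_str_alt str1 str2 = lB.foldl max 0 := rfl
  rw [hA, hB]
  -- membership in common
  have hmem : ∀ c : Char, c ∈ common ↔ c ∈ str1.toList ∧ c ∈ str2.toList := by
    intro c
    rw [hc, PySem.Set.mem_inter, PySem.Set.mem_ofList, PySem.Set.mem_ofList]
  -- self bounds
  have hselfA := (pvFoldA_le_iff p f pvAsciiLetters 0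
      (pvAsciiLetters.foldl (fun cur i => if p i then (if f i > cur then f i else cur) else cur) 0)).mp le_rfl
  have hselfB := (pvFoldMax_le_iff lB 0 (lB.foldl max 0)).mp le_rfl
  apply le_antisymm
  · rw [pvFoldA_le_iff]
    refine ⟨hselfB.1, fun i hi hpi => ?_⟩
    rw [pvAscii_eq] at hi
    rcases List.mem_cons.mp hi with rfl | hi
    · have : f "" = 0 := by decide
      rw [this]; exact hselfB.1
    · simp only [List.mem_map] at hi
      obtain ⟨c, hcl, rfl⟩ := hi
      have halpha := (pvLetter_facts c hcl).1
      have hidx := pvIdx c hcl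
      have hs1 : c ∈ str1.toList := (pvIsIn_single c str1).mp (by
        have := (Bool.and_eq_true _ _).mp hpi
        exact this.1)
      have hs2 : c ∈ str2.toList := (pvIsIn_single c str2).mp (by
        have := (Bool.and_eq_true _ _).mp hpi
        exact this.2)
      have hcm : c ∈ common.filter (fun c => PySem.Chars.isalpha c) :=
        List.mem_filter.mpr ⟨(hmem c).mpr ⟨hs1, hs2⟩, halpha⟩
      have hx : pvPrio c ∈ lB := List.mem_map.mpr ⟨c, hcm, rfl⟩
      have := hselfB.2 (pvPrio c) hx
      calc f (String.ofList [c]) = pvPrio c := hidx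
        _ ≤ lB.foldl max 0 := this
  · rw [pvFoldMax_le_iff]
    refine ⟨hselfA.1, fun x hx => ?_⟩
    rw [hlB] at hx
    simp only [List.mem_map, List.mem_filter] at hx
    obtain ⟨c, ⟨hcm, halpha⟩, rfl⟩ := hx
    have hcl : c ∈ pvLetterChars := pvMem_letters_of_isalpha c halpha
    have hidx := pvIdx c hcl
    have hmemc := (hmem c).mp hcm
    have hpi : p (String.ofList [c]) = true := by
      rw [hp]
      exact (Bool.and_eq_true _ _).mpr
        ⟨(pvIsIn_single c str1).mpr hmemc.1, (pvIsIn_single c str2).mpr hmemc.2⟩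
    have hiin : String.ofList [c] ∈ pvAsciiLetters := by
      rw [pvAscii_eq]
      exact List.mem_cons_of_mem _ (List.mem_map.mpr ⟨c, hcl, rfl⟩)
    have := hselfA.2 (String.ofList [c]) hiin hpi
    calc pvPrio c = f (String.ofList [c]) := hidx.symm
      _ ≤ _ := this

-- ===== VERDICT (by name: the statement is the Claim_ definition above) =====
theorem common_letter_betn_str_spec : Claim_equal_common_letter_betn_str := by
  intro str1 str2 _
  unfold Spec_common_letter_betn_str
  exact pvMain str1 str2
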